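-- pv_equiv track=rewrite | github.com/Hafiz-Sakib/Data-Structures | Lab Report/DS Lab Report 04/Sakib/assignment.py | find_most_influential_user
-- ===== SOURCE A (Python) =====
-- def dfs(graph, user, visited):
--     visited.add(user)
--     total_friends = 0
--
--     for friend in graph.get(user, []):
--         if friend not in visited:
--             total_friends += dfs(graph, friend, visited)
--
--     return total_friends + 1
--
-- def find_most_influential_user(social_network):
--     most_influential_user = None
--     max_friends = -1
--
--     for user in social_network:
--         visited = set()
--         friends_count = dfs(social_network, user, visited)
--         if friends_count > max_friends:
--             max_friends = friends_count
--             most_influential_user = user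
--
--     return most_influential_user, max_friends - 1
-- ===== SOURCE B (Python) =====
-- def find_most_influential_user(social_network):
--     most_influential_user = None
--     max_friends = -1
--
--     for user in social_network:
--         visited = set()
--         stack = [user]
--         while stack:
--             node = stack.pop()
--             if node not in visited:
--                 visited.add(node)
--                 stack.extend(f for f in social_network.get(node, []) if f not in visited)
--         friends_count = len(visited)
--         if friends_count > max_friends:
--             max_friends = friends_count
--             most_influential_user = user
--
--     return most_influential_user, max_friends - 1
-- ===== Notes on version B (the rewrite author's own statement) =====
-- stated objective: alternative
-- what changed: The recursive dfs helper is replaced by an iterative explicit-stack traversal inside the main loop, counting the reachable set as len(visited) instead of summing return values through the recursion.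
import Mathlib
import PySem

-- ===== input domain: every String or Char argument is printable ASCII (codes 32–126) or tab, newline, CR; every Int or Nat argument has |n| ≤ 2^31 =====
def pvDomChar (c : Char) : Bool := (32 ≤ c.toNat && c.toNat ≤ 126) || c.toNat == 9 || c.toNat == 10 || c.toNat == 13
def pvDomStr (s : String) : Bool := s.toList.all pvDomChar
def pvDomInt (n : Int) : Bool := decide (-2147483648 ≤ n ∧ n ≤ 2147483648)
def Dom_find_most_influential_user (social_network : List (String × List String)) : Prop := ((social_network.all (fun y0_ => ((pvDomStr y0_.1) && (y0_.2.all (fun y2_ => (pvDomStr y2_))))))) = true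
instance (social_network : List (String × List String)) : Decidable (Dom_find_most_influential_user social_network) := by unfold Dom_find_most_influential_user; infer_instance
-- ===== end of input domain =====

-- B replaces A's recursive dfs helper by an iterative explicit-stack traversal (len(visited));
-- same results, no recursion. Objective: alternative decomposition, same asymptotic cost.

-- ===== PORT A =====
-- shared input accessor: graph.get(user, []) — first-match dict lookup (exact, via PySem.Dict)
def pvNbrs (g : List (String × List String)) (u : String) : List String :=
  PySem.Dict.getD (PySem.Dict.mk g) u []

-- fuel for the traversals (an artifact making the ports total; proved sufficient below)
def pvFuel (g : List (String × List String)) : Nat :=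
  g.length + (g.map (fun p => p.2.length)).sum + 2

-- literal port of A's dfs: visited.add(user); for friend in graph.get(user, []):
--   if friend not in visited: total += dfs(...); return total + 1.
-- The (total, visited) pair threads the mutated set; fuel only makes it total.
def pvDfs (g : List (String × List String)) : Nat → String → PySem.Set String → Int × PySem.Set String
  | 0, _, visited => (0, visited)
  | fuel + 1, user, visited =>
    let visited1 := PySem.Set.add visited user
    let r := (pvNbrs g user).foldl
      (fun (acc : Int × PySem.Set String) friend =>
        if PySem.Set.contains acc.2 friend then acc
        else
          let s := pvDfs g fuel friend acc.2
          (acc.1 + s.1, s.2))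
      (0, visited1)
    (r.1 + 1, r.2)

def find_most_influential_user (social_network : List (String × List String)) : Option String × Int :=
  let r := social_network.foldl
    (fun (acc : Option String × Int) p =>
      let d := pvDfs social_network (pvFuel social_network) p.1 PySem.Set.empty
      if d.1 > acc.2 then (some p.1, d.1) else acc)
    (none, -1)
  (r.1, r.2 - 1)

-- ===== PORT B =====
-- literal port of B's while-loop: the stack is stored top-first (head = Python's stack[-1]),
-- so stack.extend(new) is new.reverse ++ rest; fuel only makes the loop total.
def pvLoop (g : List (String × List String)) : Nat → List String → PySem.Set String → PySem.Set String
  | 0, _, seen => seen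
  | fuel + 1, stack, seen =>
    match stack with
    | [] => seen
    | node :: rest =>
      if PySem.Set.contains seen node then pvLoop g fuel rest seen
      else
        let seen1 := PySem.Set.add seen node
        pvLoop g fuel
          (((pvNbrs g node).filter (fun f => !PySem.Set.contains seen1 f)).reverse ++ rest) seen1

def find_most_influential_user_alt (social_network : List (String × List String)) : Option String × Int :=
  let r := social_network.foldl
    (fun (acc : Option String × Int) p =>
      let visited := pvLoop social_network (pvFuel social_network) [p.1] PySem.Set.empty
      let friends_count : Int := (visited.length : Int)
      if friends_count > acc.2 then (some p.1, friends_count) else acc)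
    (none, -1)
  (r.1, r.2 - 1)

-- ===== PRECONDITION & SPEC =====
def Spec_find_most_influential_user (social_network : List (String × List String)) (out : Option String × Int) : Prop := out = find_most_influential_user_alt social_network
instance (social_network : List (String × List String)) (out : Option String × Int) : Decidable (Spec_find_most_influential_user social_network out) := by unfold Spec_find_most_influential_user; infer_instance

-- ===== CLAIM (what is proved, stated in full; the proofs are below) =====
def Claim_equal_find_most_influential_user : Prop := ∀ (social_network : List (String × List String)), Dom_find_most_influential_user social_network → Spec_find_most_influential_user social_network (find_most_influential_user social_network)

-- ===== LEMMAS AND PROOFS =====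

-- the reachability relation of the graph
def pvReach (g : List (String × List String)) (u x : String) : Prop :=
  Relation.ReflTransGen (fun a b => b ∈ pvNbrs g a) u x

-- all node names occurring in the graph
def pvUniv (g : List (String × List String)) : List String :=
  g.map Prod.fst ++ g.flatMap Prod.snd

-- nodes of the graph not yet visited (termination measure for A's dfs)
def pvMeas (g : List (String × List String)) (vis : List String) : Nat :=
  ((pvUniv g).toFinset \ vis.toFinset).card

-- remaining work potential for B's loop
def pvPot (g : List (String × List String)) (seen : List String) : Nat :=
  Finset.sum ((g.map Prod.fst).toFinset \ seen.toFinset) (fun k => (pvNbrs g k).length)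

lemma pvNbrs_nil (u : String) : pvNbrs [] u = [] := rfl

lemma pvNbrs_cons (k : String) (v : List String) (g : List (String × List String)) (u : String) :
    pvNbrs ((k, v) :: g) u = if k = u then v else pvNbrs g u := by
  by_cases h : k = u <;>
    simp [pvNbrs, PySem.Dict.getD, PySem.Dict.get?_mk_cons, h]

lemma pvNbrs_subset_univ (g : List (String × List String)) (x y : String)
    (h : y ∈ pvNbrs g x) : y ∈ pvUniv g := by
  have key : ∀ (g' : List (String × List String)), y ∈ pvNbrs g' x → y ∈ g'.flatMap Prod.snd := by
    intro g'
    induction g' with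
    | nil => intro h'; simp [pvNbrs_nil] at h'
    | cons p t ih =>
      intro h'
      rw [show p = (p.1, p.2) from rfl, pvNbrs_cons] at h'
      rw [List.flatMap_cons]
      by_cases hk : p.1 = x
      · rw [if_pos hk] at h'
        exact List.mem_append_left _ h'
      · rw [if_neg hk] at h'
        exact List.mem_append_right _ (ih h')
  exact List.mem_append_right _ (key g h)

lemma pvNbrs_of_not_key (g : List (String × List String)) (u : String)
    (h : u ∉ g.map Prod.fst) : pvNbrs g u = [] := by
  induction g with
  | nil => rfl
  | cons p t ih =>
    simp only [List.map_cons, List.mem_cons, not_or] at h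
    rw [show p = (p.1, p.2) from rfl, pvNbrs_cons, if_neg (fun e => h.1 e.symm)]
    exact ih h.2

lemma pvKeySum_le (g : List (String × List String)) :
    Finset.sum ((g.map Prod.fst).toFinset) (fun k => (pvNbrs g k).length)
      ≤ (g.map (fun p => p.2.length)).sum := by
  induction g with
  | nil => simp
  | cons p t ih =>
    obtain ⟨a, v⟩ := p
    simp only [List.map_cons, List.toFinset_cons, List.sum_cons]
    by_cases hp : a ∈ (t.map Prod.fst).toFinset
    · rw [Finset.insert_eq_self.mpr hp, ← Finset.add_sum_erase _ _ hp]
      have h1 : (pvNbrs ((a, v) :: t) a).length = v.length := by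
        rw [pvNbrs_cons, if_pos rfl]
      have h2 : ∀ k ∈ (t.map Prod.fst).toFinset.erase a,
          (pvNbrs ((a, v) :: t) k).length = (pvNbrs t k).length := by
        intro k hk
        rw [pvNbrs_cons, if_neg (fun e => (Finset.ne_of_mem_erase hk) e.symm)]
      rw [h1, Finset.sum_congr rfl h2]
      have h3 : ∑ k ∈ (t.map Prod.fst).toFinset.erase a, (pvNbrs t k).length
          ≤ ∑ k ∈ (t.map Prod.fst).toFinset, (pvNbrs t k).length :=
        Finset.sum_le_sum_of_subset (Finset.erase_subset _ _)
      exact Nat.add_le_add_left (le_trans h3 ih) _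
    · rw [Finset.sum_insert hp]
      have h1 : (pvNbrs ((a, v) :: t) a).length = v.length := by
        rw [pvNbrs_cons, if_pos rfl]
      have h2 : ∀ k ∈ (t.map Prod.fst).toFinset,
          (pvNbrs ((a, v) :: t) k).length = (pvNbrs t k).length := by
        intro k hk
        rw [pvNbrs_cons, if_neg (fun (e : a = k) => hp (e ▸ hk))]
      rw [h1, Finset.sum_congr rfl h2]
      exact Nat.add_le_add_left ih _

lemma pvMeas_mono (g : List (String × List String)) {l l' : List String}
    (h : ∀ x ∈ l, x ∈ l') : pvMeas g l' ≤ pvMeas g l :=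
  Finset.card_le_card (Finset.sdiff_subset_sdiff (Finset.Subset.refl _)
    (fun x hx => List.mem_toFinset.mpr (h x (List.mem_toFinset.mp hx))))

lemma pvMeas_append (g : List (String × List String)) {vis : List String} {user : String}
    (hu : user ∈ pvUniv g) (hnm : user ∉ vis) :
    pvMeas g (vis ++ [user]) + 1 = pvMeas g vis := by
  unfold pvMeas
  rw [List.toFinset_append, List.toFinset_cons, List.toFinset_nil, insert_empty_eq,
    Finset.union_singleton, Finset.sdiff_insert]
  have hmem : user ∈ (pvUniv g).toFinset \ vis.toFinset :=
    Finset.mem_sdiff.mpr ⟨List.mem_toFinset.mpr hu, fun hc => hnm (List.mem_toFinset.mp hc)⟩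
  rw [Finset.card_erase_of_mem hmem]
  have := Finset.card_pos.mpr ⟨user, hmem⟩
  omega

-- A's dfs satisfies the standard DFS invariants when the fuel dominates the measure
lemma pvDfs_spec (g : List (String × List String)) :
    ∀ fuel user vis, vis.Nodup → user ∉ vis → user ∈ pvUniv g → pvMeas g vis < fuel →
      let r := pvDfs g fuel user vis
      vis <+: r.2 ∧ user ∈ r.2 ∧ r.2.Nodup ∧ r.1 = (r.2.length : Int) - (vis.length : Int) ∧
      (∀ x ∈ r.2, x ∈ vis ∨ pvReach g user x) ∧
      (∀ x ∈ r.2, x ∉ vis → ∀ y ∈ pvNbrs g x, y ∈ r.2) := by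
  intro fuel
  induction fuel with
  | zero => intro user vis _ _ _ hm; exact absurd hm (Nat.not_lt_zero _)
  | succ n ih =>
    intro user vis hnd hnm huniv hm
    simp only [pvDfs]
    set vis1 := PySem.Set.add vis user with hvis1
    have hv1 : vis1 = vis ++ [user] := PySem.Set.add_of_not_mem hnm
    have hv1nd : vis1.Nodup := PySem.Set.nodup_add _ _ hnd
    have hv1len : vis1.length = vis.length + 1 := by rw [hv1]; simp
    have huser1 : user ∈ vis1 := by rw [hv1]; simp
    have hpre1 : vis <+: vis1 := by rw [hv1]; exact List.prefix_append _ _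
    have hm1 : pvMeas g vis1 < n := by
      have := pvMeas_append g huniv hnm
      rw [← hv1] at this
      omega
    -- invariant of the for-loop over the friends list
    have Hfold : ∀ (friends : List String), (∀ f ∈ friends, f ∈ pvUniv g) →
        ∀ (total : Int) (vs : PySem.Set String), vs.Nodup → pvMeas g vs < n →
        (friends.foldl
          (fun (acc : Int × PySem.Set String) friend =>
            if PySem.Set.contains acc.2 friend then acc
            else
              let s := pvDfs g n friend acc.2
              (acc.1 + s.1, s.2))
          (total, vs)).2.Nodup ∧
        vs <+: (friends.foldl
          (fun (acc : Int × PySem.Set String) friend =>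
            if PySem.Set.contains acc.2 friend then acc
            else
              let s := pvDfs g n friend acc.2
              (acc.1 + s.1, s.2))
          (total, vs)).2 ∧
        (∀ f ∈ friends, f ∈ (friends.foldl
          (fun (acc : Int × PySem.Set String) friend =>
            if PySem.Set.contains acc.2 friend then acc
            else
              let s := pvDfs g n friend acc.2
              (acc.1 + s.1, s.2))
          (total, vs)).2) ∧
        (friends.foldl
          (fun (acc : Int × PySem.Set String) friend =>
            if PySem.Set.contains acc.2 friend then acc
            else
              let s := pvDfs g n friend acc.2
              (acc.1 + s.1, s.2))
          (total, vs)).1 = total + (((friends.foldl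
          (fun (acc : Int × PySem.Set String) friend =>
            if PySem.Set.contains acc.2 friend then acc
            else
              let s := pvDfs g n friend acc.2
              (acc.1 + s.1, s.2))
          (total, vs)).2.length : Int) - (vs.length : Int)) ∧
        (∀ x ∈ (friends.foldl
          (fun (acc : Int × PySem.Set String) friend =>
            if PySem.Set.contains acc.2 friend then acc
            else
              let s := pvDfs g n friend acc.2
              (acc.1 + s.1, s.2))
          (total, vs)).2, x ∈ vs ∨ ∃ f ∈ friends, pvReach g f x) ∧
        (∀ x ∈ (friends.foldl
          (fun (acc : Int × PySem.Set String) friend =>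
            if PySem.Set.contains acc.2 friend then acc
            else
              let s := pvDfs g n friend acc.2
              (acc.1 + s.1, s.2))
          (total, vs)).2, x ∉ vs → ∀ y ∈ pvNbrs g x, y ∈ (friends.foldl
          (fun (acc : Int × PySem.Set String) friend =>
            if PySem.Set.contains acc.2 friend then acc
            else
              let s := pvDfs g n friend acc.2
              (acc.1 + s.1, s.2))
          (total, vs)).2) := by
      intro friends
      induction friends with
      | nil =>
        intro _ total vs hvnd _
        refine ⟨hvnd, List.prefix_refl _, by simp, by simp, fun x hx => Or.inl hx, ?_⟩
        intro x hx hnx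
        exact absurd hx hnx
      | cons f rest ihf =>
        intro hf total vs hvnd hvm
        simp only [List.foldl_cons]
        by_cases hc : PySem.Set.contains vs f
        · have hfv : f ∈ vs := (PySem.Set.contains_iff vs f).mp hc
          simp only [hc, if_pos]
          obtain ⟨g3, g1, g2, g4, g5, g6⟩ :=
            ihf (fun x hx => hf x (List.mem_cons_of_mem _ hx)) total vs hvnd hvm
          refine ⟨g3, g1, ?_, g4, ?_, g6⟩
          · intro f' hf'
            rcases List.mem_cons.mp hf' with rfl | hf'
            · exact g1.subset hfv
            · exact g2 f' hf'
          · intro x hx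
            rcases g5 x hx with h | ⟨f', hf', hr⟩
            · exact Or.inl h
            · exact Or.inr ⟨f', List.mem_cons_of_mem _ hf', hr⟩
        · have hfv : f ∉ vs := fun hmem => hc ((PySem.Set.contains_iff vs f).mpr hmem)
          simp only [hc, if_neg, Bool.false_eq_true, not_false_iff]
          obtain ⟨p1, p2, p3, p4, p5, p6⟩ :=
            ih f vs hvnd hfv (hf f List.mem_cons_self) hvm
          set s := pvDfs g n f vs with hs
          have hsm : pvMeas g s.2 < n := lt_of_le_of_lt (pvMeas_mono g p1.subset) hvm
          obtain ⟨g3, g1, g2, g4, g5, g6⟩ :=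
            ihf (fun x hx => hf x (List.mem_cons_of_mem _ hx)) (total + s.1) s.2 p3 hsm
          have hlen : (vs.length : Int) ≤ (s.2.length : Int) := by
            exact_mod_cast List.IsPrefix.length_le p1
          refine ⟨g3, p1.trans g1, ?_, ?_, ?_, ?_⟩
          · intro f' hf'
            rcases List.mem_cons.mp hf' with rfl | hf'
            · exact g1.subset p2
            · exact g2 f' hf'
          · rw [g4, p4]; push_cast; ring
          · intro x hx
            rcases g5 x hx with h | ⟨f', hf', hr⟩
            · rcases p5 x h with h' | hr'
              · exact Or.inl h'
              · exact Or.inr ⟨f, List.mem_cons_self, hr'⟩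
            · exact Or.inr ⟨f', List.mem_cons_of_mem _ hf', hr⟩
          · intro x hx hnx
            by_cases hxs : x ∈ s.2
            · intro y hy
              exact g1.subset (p6 x hxs hnx y hy)
            · exact g6 x hx hxs
    obtain ⟨f3, f1, f2, f4, f5, f6⟩ :=
      Hfold (pvNbrs g user) (fun f hf => pvNbrs_subset_univ g user f hf) 0 vis1 hv1nd hm1
    refine ⟨hpre1.trans f1, f1.subset huser1, f3, ?_, ?_, ?_⟩
    · rw [f4]; rw [hv1len]; push_cast; ring
    · intro x hx
      rcases f5 x hx with h | ⟨f, hf, hr⟩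
      · rw [hv1] at h
        rcases List.mem_append.mp h with h | h
        · exact Or.inl h
        · simp at h
          subst h
          exact Or.inr Relation.ReflTransGen.refl
      · exact Or.inr (Relation.ReflTransGen.head hf hr)
    · intro x hx hnx
      by_cases hx1 : x ∈ vis1
      · have hxu : x = user := by
          rw [hv1] at hx1
          rcases List.mem_append.mp hx1 with h | h
          · exact absurd h hnx
          · simpa using h
        subst hxu
        intro y hy
        exact f2 y hy
      · exact f6 x hx hx1

-- B's loop satisfies the corresponding invariants when the fuel dominates the potential
lemma pvLoop_spec (g : List (String × List String)) :
    ∀ fuel stack seen, seen.Nodup → stack.length + pvPot g seen < fuel →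
      let r := pvLoop g fuel stack seen
      seen <+: r ∧ (∀ x ∈ stack, x ∈ r) ∧ r.Nodup ∧
      (∀ x ∈ r, x ∈ seen ∨ ∃ s ∈ stack, pvReach g s x) ∧
      (∀ x ∈ r, x ∉ seen → ∀ y ∈ pvNbrs g x, y ∈ r) := by
  intro fuel
  induction fuel with
  | zero => intro stack seen _ hm; exact absurd hm (Nat.not_lt_zero _)
  | succ n ihl =>
    intro stack seen hnd hm
    cases stack with
    | nil =>
      simp only [pvLoop]
      exact ⟨List.prefix_refl _, by simp, hnd, fun x hx => Or.inl hx,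
        fun x hx hnx => absurd hx hnx⟩
    | cons node rest =>
      simp only [pvLoop]
      by_cases hc : PySem.Set.contains seen node
      · have hfv : node ∈ seen := (PySem.Set.contains_iff seen node).mp hc
        simp only [hc, if_pos]
        have hm' : rest.length + pvPot g seen < n := by
          simp only [List.length_cons] at hm; omega
        obtain ⟨q1, q2, q3, q4, q5⟩ := ihl rest seen hnd hm'
        refine ⟨q1, ?_, q3, ?_, q5⟩
        · intro x hx
          rcases List.mem_cons.mp hx with rfl | hx
          · exact q1.subset hfv
          · exact q2 x hx
        · intro x hx
          rcases q4 x hx with h | ⟨s, hs, hr⟩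
          · exact Or.inl h
          · exact Or.inr ⟨s, List.mem_cons_of_mem _ hs, hr⟩
      · have hfv : node ∉ seen := fun hmem => hc ((PySem.Set.contains_iff seen node).mpr hmem)
        simp only [hc, if_neg, Bool.false_eq_true, not_false_iff]
        set seen1 := PySem.Set.add seen node with hseen1
        have hs1 : seen1 = seen ++ [node] := PySem.Set.add_of_not_mem hfv
        have hs1nd : seen1.Nodup := PySem.Set.nodup_add _ _ hnd
        have hnode1 : node ∈ seen1 := by rw [hs1]; simp
        have hpre1 : seen <+: seen1 := by rw [hs1]; exact List.prefix_append _ _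
        set filt := (pvNbrs g node).filter (fun f => !PySem.Set.contains seen1 f) with hfilt
        -- potential decreases strictly
        have hsdiff : (g.map Prod.fst).toFinset \ seen1.toFinset
            = ((g.map Prod.fst).toFinset \ seen.toFinset).erase node := by
          rw [hs1, List.toFinset_append, List.toFinset_cons, List.toFinset_nil,
            insert_empty_eq, Finset.union_singleton, Finset.sdiff_insert]
        have hpot : (filt.reverse ++ rest).length + pvPot g seen1 < n := by
          have hlf : filt.length ≤ (pvNbrs g node).length := List.length_filter_le _ _
          have hlen : (filt.reverse ++ rest).length = filt.length + rest.length := by simp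
          by_cases hkey : node ∈ (g.map Prod.fst).toFinset
          · have hknode : node ∈ (g.map Prod.fst).toFinset \ seen.toFinset :=
              Finset.mem_sdiff.mpr ⟨hkey, fun hcm => hfv (List.mem_toFinset.mp hcm)⟩
            have heq : (pvNbrs g node).length + pvPot g seen1 = pvPot g seen := by
              unfold pvPot
              rw [hsdiff]
              exact Finset.add_sum_erase _ (fun k => (pvNbrs g k).length) hknode
            simp only [List.length_cons] at hm
            omega
          · have hz : pvNbrs g node = [] :=
              pvNbrs_of_not_key g node (fun hmem => hkey (List.mem_toFinset.mpr hmem))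
            have hzf : filt = [] := by rw [hfilt, hz]; rfl
            have hle : pvPot g seen1 ≤ pvPot g seen := by
              unfold pvPot
              rw [hsdiff]
              exact Finset.sum_le_sum_of_subset (Finset.erase_subset _ _)
            simp only [List.length_cons] at hm
            rw [hzf]
            simp only [List.reverse_nil, List.nil_append]
            omega
        obtain ⟨q1, q2, q3, q4, q5⟩ := ihl (filt.reverse ++ rest) seen1 hs1nd hpot
        refine ⟨hpre1.trans q1, ?_, q3, ?_, ?_⟩
        · intro x hx
          rcases List.mem_cons.mp hx with rfl | hx
          · exact q1.subset hnode1
          · exact q2 x (List.mem_append_right _ hx)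
        · intro x hx
          rcases q4 x hx with h | ⟨s, hs, hr⟩
          · rw [hs1] at h
            rcases List.mem_append.mp h with h | h
            · exact Or.inl h
            · simp at h
              subst h
              exact Or.inr ⟨x, List.mem_cons_self, Relation.ReflTransGen.refl⟩
          · rcases List.mem_append.mp hs with hsf | hsr
            · have hsn : s ∈ pvNbrs g node := (List.mem_filter.mp (List.mem_reverse.mp hsf)).1
              exact Or.inr ⟨node, List.mem_cons_self, Relation.ReflTransGen.head hsn hr⟩
            · exact Or.inr ⟨s, List.mem_cons_of_mem _ hsr, hr⟩
        · intro x hx hnx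
          by_cases hx1 : x ∈ seen1
          · have hxu : x = node := by
              rw [hs1] at hx1
              rcases List.mem_append.mp hx1 with h | h
              · exact absurd h hnx
              · simpa using h
            subst hxu
            intro y hy
            by_cases hy1 : y ∈ seen1
            · exact q1.subset hy1
            · have : y ∈ filt := by
                rw [hfilt]
                refine List.mem_filter.mpr ⟨hy, ?_⟩
                simp only [Bool.not_eq_eq_eq_not, Bool.not_true]
                exact (Bool.not_eq_true _).mp
                  (fun hcy => hy1 ((PySem.Set.contains_iff seen1 y).mp hcy))
              exact q2 y (List.mem_append_left _ (List.mem_reverse.mpr this))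
          · exact q5 x hx hx1

-- per-user: A's dfs count equals B's visited size
lemma pvCount_eq (g : List (String × List String)) (user : String)
    (hu : user ∈ g.map Prod.fst) :
    (pvDfs g (pvFuel g) user PySem.Set.empty).1
      = ((pvLoop g (pvFuel g) [user] PySem.Set.empty).length : Int) := by
  have huniv : user ∈ pvUniv g := List.mem_append_left _ hu
  have hmA : pvMeas g PySem.Set.empty < pvFuel g := by
    have h1 : pvMeas g PySem.Set.empty = (pvUniv g).toFinset.card := by
      unfold pvMeas
      simp [PySem.Set.empty]
    have h2 : (pvUniv g).toFinset.card ≤ (pvUniv g).length := List.toFinset_card_le _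
    have h3 : (pvUniv g).length = g.length + (g.map (fun p => p.2.length)).sum := by
      unfold pvUniv
      simp [List.length_flatMap]
    unfold pvFuel
    omega
  have hmB : ([user] : List String).length + pvPot g PySem.Set.empty < pvFuel g := by
    have h1 : pvPot g PySem.Set.empty = ∑ k ∈ (g.map Prod.fst).toFinset, (pvNbrs g k).length := by
      unfold pvPot
      simp [PySem.Set.empty]
    have h2 := pvKeySum_le g
    unfold pvFuel
    simp only [List.length_cons, List.length_nil]
    omega
  have hnodup : (PySem.Set.empty : PySem.Set String).Nodup := List.nodup_nil
  have hnm : user ∉ (PySem.Set.empty : PySem.Set String) := by simp [PySem.Set.empty]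
  obtain ⟨a1, a2, a3, a4, a5, a6⟩ := pvDfs_spec g (pvFuel g) user PySem.Set.empty hnodup hnm huniv hmA
  obtain ⟨b1, b2, b3, b4, b5⟩ := pvLoop_spec g (pvFuel g) [user] PySem.Set.empty hnodup hmB
  have hA : ∀ x, x ∈ (pvDfs g (pvFuel g) user PySem.Set.empty).2 ↔ pvReach g user x := by
    intro x
    constructor
    · intro hx
      rcases a5 x hx with h | h
      · exact absurd h (by simp [PySem.Set.empty])
      · exact h
    · intro hr
      induction hr with
      | refl => exact a2
      | tail h e ihx => exact a6 _ ihx (by simp [PySem.Set.empty]) _ e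
  have hB : ∀ x, x ∈ pvLoop g (pvFuel g) [user] PySem.Set.empty ↔ pvReach g user x := by
    intro x
    constructor
    · intro hx
      rcases b4 x hx with h | ⟨s, hs, hr⟩
      · exact absurd h (by simp [PySem.Set.empty])
      · rcases List.mem_singleton.mp hs with rfl
        exact hr
    · intro hr
      induction hr with
      | refl => exact b2 user List.mem_cons_self
      | tail h e ihx => exact b5 _ ihx (by simp [PySem.Set.empty]) _ e
  have hperm : List.Perm (pvDfs g (pvFuel g) user PySem.Set.empty).2 (pvLoop g (pvFuel g) [user] PySem.Set.empty) :=
    (List.perm_ext_iff_of_nodup a3 b3).mpr (fun x => (hA x).trans (hB x).symm)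
  have hlen := hperm.length_eq
  rw [a4]
  simp only [PySem.Set.empty, List.length_nil, Nat.cast_zero, sub_zero]
  exact_mod_cast hlen

-- ===== VERDICT (by name: the statement is the Claim_ definition above) =====
theorem find_most_influential_user_spec : Claim_equal_find_most_influential_user := by
  unfold Claim_equal_find_most_influential_user
  intro g _
  unfold Spec_find_most_influential_user
  unfold find_most_influential_user find_most_influential_user_alt
  have hfold : g.foldl
      (fun (acc : Option String × Int) p =>
        let d := pvDfs g (pvFuel g) p.1 PySem.Set.empty
        if d.1 > acc.2 then (some p.1, d.1) else acc)
      (none, -1)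
    = g.foldl
      (fun (acc : Option String × Int) p =>
        let visited := pvLoop g (pvFuel g) [p.1] PySem.Set.empty
        let friends_count : Int := (visited.length : Int)
        if friends_count > acc.2 then (some p.1, friends_count) else acc)
      (none, -1) := by
    apply PySem.List.foldl_congr_mem
    intro acc p hp
    simp only
    rw [pvCount_eq g p.1 (List.mem_map_of_mem hp)]
  rw [hfold]
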